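-- pv_equiv track=rewrite | github.com/sssjp123/MonNN | src/utils.py | generate_layer_combinations
-- ===== SOURCE A (Python) =====
-- import itertools
--
-- def generate_layer_combinations(
--     min_layers=1,
--     max_layers=3,
--     units=[8, 16, 32, 64]
-- ):
--
--     combinations = []
--
--     for n_layers in range(min_layers, max_layers + 1):
--         for combo in itertools.product(units, repeat=n_layers):
--             combinations.append(list(combo))
--
--     return [str(combo) for combo in combinations]
-- ===== SOURCE B (Python) =====
-- def generate_layer_combinations(
--     min_layers=1,
--     max_layers=3,
--     units=[8, 16, 32, 64]
-- ):
--     # Incremental build: extend the previous layer's combinations by one unit,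
--     # collecting each layer whose length lies in [min_layers, max_layers].
--     if max_layers < min_layers:
--         return []
--     result = []
--     current = [[]]
--     if min_layers <= 0 <= max_layers:
--         result.extend(current)
--     for n in range(1, max_layers + 1):
--         current = [c + [u] for c in current for u in units]
--         if min_layers <= n:
--             result.extend(current)
--     return [str(c) for c in result]
-- ===== Notes on version B (the rewrite author's own statement) =====
-- stated objective: alternative
-- what changed: B replaces the per-length itertools.product calls with an incremental build that extends the previous layer's combination list by one unit per step (prefix-outer, unit-inner, matching product's odometer order), collecting each layer whose length is within [min_layers, max_layers].
import Mathlib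
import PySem

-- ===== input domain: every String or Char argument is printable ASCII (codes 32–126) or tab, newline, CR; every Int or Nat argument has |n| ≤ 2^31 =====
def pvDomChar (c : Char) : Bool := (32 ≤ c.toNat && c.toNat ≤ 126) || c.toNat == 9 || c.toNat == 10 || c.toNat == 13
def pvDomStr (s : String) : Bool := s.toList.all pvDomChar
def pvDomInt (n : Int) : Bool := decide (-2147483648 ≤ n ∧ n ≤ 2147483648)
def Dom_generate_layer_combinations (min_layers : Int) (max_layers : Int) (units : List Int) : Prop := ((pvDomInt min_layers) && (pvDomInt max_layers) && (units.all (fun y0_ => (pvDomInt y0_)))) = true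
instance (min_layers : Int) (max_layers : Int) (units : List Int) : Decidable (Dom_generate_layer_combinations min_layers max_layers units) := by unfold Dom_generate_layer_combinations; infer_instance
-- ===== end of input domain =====

-- B builds the combinations incrementally, extending the previous layer's list by one unit
-- per step instead of calling a fresh cartesian product for every length (objective: alternative).

-- str(list_of_ints): "[a, b, c]" — exact hand port of CPython's list repr for int elements.
def pvStrCombo (c : List Int) : String :=
  PySem.Str.join "" ["[", PySem.Str.join ", " (c.map PySem.Int.toStr), "]"]

-- ===== PORT A =====
-- itertools.product(units, repeat=n) as lists, in product's odometer order (leftmost slowest).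
def pvProdRep (units : List Int) : Nat → List (List Int)
  | 0 => [[]]
  | n + 1 => units.flatMap (fun u => (pvProdRep units n).map (fun r => u :: r))

def generate_layer_combinations (min_layers : Int) (max_layers : Int) (units : List Int) : List String :=
  let combinations :=
    (PySem.List.pyRange min_layers (max_layers + 1) 1).foldl
      (fun acc n => acc ++ pvProdRep units n.toNat) []
  combinations.map pvStrCombo

-- ===== PORT B =====
-- [c + [u] for c in current for u in units]
def pvExtend (current : List (List Int)) (units : List Int) : List (List Int) :=
  current.flatMap (fun c => units.map (fun u => c ++ [u]))

def generate_layer_combinations_alt (min_layers : Int) (max_layers : Int) (units : List Int) : List String :=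
  if max_layers < min_layers then [] else
  let result0 : List (List Int) := if min_layers ≤ 0 ∧ 0 ≤ max_layers then [[]] else []
  let p :=
    (PySem.List.pyRange 1 (max_layers + 1) 1).foldl
      (fun (s : List (List Int) × List (List Int)) n =>
        let cur := pvExtend s.2 units
        (if min_layers ≤ n then s.1 ++ cur else s.1, cur))
      (result0, [[]])
  p.1.map pvStrCombo

-- ===== PRECONDITION & SPEC =====
-- Pre_ excludes min_layers < 0 with a non-empty range, where A raises
-- ValueError (itertools.product with a negative repeat).
def Pre_generate_layer_combinations (min_layers : Int) (max_layers : Int) (units : List Int) : Prop :=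
  0 ≤ min_layers ∨ max_layers < min_layers
instance (min_layers : Int) (max_layers : Int) (units : List Int) : Decidable (Pre_generate_layer_combinations min_layers max_layers units) := by unfold Pre_generate_layer_combinations; infer_instance

def pvWitness_generate_layer_combinations : Int × Int × List Int := (1, 2, [8, 16])

def Spec_generate_layer_combinations (min_layers : Int) (max_layers : Int) (units : List Int) (out : List String) : Prop := out = generate_layer_combinations_alt min_layers max_layers units
instance (min_layers : Int) (max_layers : Int) (units : List Int) (out : List String) : Decidable (Spec_generate_layer_combinations min_layers max_layers units out) := by unfold Spec_generate_layer_combinations; infer_instance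

-- ===== CLAIM (what is proved, stated in full; the proofs are below) =====
def Claim_equal_generate_layer_combinations : Prop := ∀ (min_layers : Int) (max_layers : Int) (units : List Int), Dom_generate_layer_combinations min_layers max_layers units → Pre_generate_layer_combinations min_layers max_layers units → Spec_generate_layer_combinations min_layers max_layers units (generate_layer_combinations min_layers max_layers units)


-- ===== LEMMAS AND PROOFS =====

-- Extending every length-n combination by one unit on the right gives the length-(n+1)
-- combinations in the same (odometer) order.
theorem pvExtend_prodRep (units : List Int) (n : Nat) :
    pvExtend (pvProdRep units n) units = pvProdRep units (n + 1) := by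
  induction n with
  | zero => simp [pvExtend, pvProdRep, ← List.map_eq_flatMap]
  | succ n ih =>
    simp only [pvProdRep, pvExtend] at *
    rw [List.flatMap_assoc]
    simp only [List.flatMap_map] at *
    refine List.flatMap_congr ?_ ; intro u _
    rw [← ih]
    simp [List.map_flatMap, List.map_map, Function.comp_def, List.cons_append]

-- Invariant of B's loop over [1, …, m]: the carried pair is
-- (collected output, current = all length-m combinations).
theorem pvBfold (min_layers : Int) (units : List Int) (r0 : List (List Int)) (m : Nat) :
    ((List.range m).map (fun k : Nat => (1 : Int) + (k : Int))).foldl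
        (fun (s : List (List Int) × List (List Int)) n =>
          let cur := pvExtend s.2 units
          (if min_layers ≤ n then s.1 ++ cur else s.1, cur))
        (r0, [[]])
      = (r0 ++ ((List.range m).map (fun k : Nat => (1 : Int) + (k : Int))).flatMap
            (fun n => if min_layers ≤ n then pvProdRep units n.toNat else []),
         pvProdRep units m) := by
  induction m with
  | zero => simp [pvProdRep]
  | succ m ih =>
    rw [List.range_succ, List.map_append, List.foldl_append, ih, List.flatMap_append]
    simp only [List.map_cons, List.map_nil, List.foldl_cons, List.foldl_nil,
      List.flatMap_cons, List.flatMap_nil, List.append_nil]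
    rw [pvExtend_prodRep]
    have ht : ((1 : Int) + (m : Int)).toNat = m + 1 := by omega
    rw [ht]
    split_ifs <;> simp [List.append_assoc]

theorem generate_layer_combinations_spec : Claim_equal_generate_layer_combinations := by
  intro min_layers max_layers units _ hpre
  unfold Spec_generate_layer_combinations
  unfold generate_layer_combinations generate_layer_combinations_alt
  simp only []
  rw [PySem.List.foldl_append_eq_flatMap]
  rcases lt_or_ge max_layers min_layers with hgt | hle
  · -- empty output on both sides
    rw [if_pos hgt, PySem.List.pyRange_one_eq_nil (by omega)]
    simp
  rw [if_neg (by omega)]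
  have hr : PySem.List.pyRange 1 (max_layers + 1) 1
      = (List.range (max_layers.toNat)).map (fun k : Nat => (1 : Int) + (k : Int)) := by
    rw [PySem.List.pyRange_one]
    have : (max_layers + 1 - 1).toNat = max_layers.toNat := by omega
    rw [this]
  rw [hr, pvBfold]
  simp only [List.nil_append]
  congr 1
  -- combo-list equality; Pre_ together with min_layers ≤ max_layers gives 0 ≤ min_layers
  have hmin : 0 ≤ min_layers := by rcases hpre with h | h; exact h; omega
  have hmax : 0 ≤ max_layers := le_trans hmin hle
  rcases eq_or_lt_of_le hmin with h0 | h1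
  · -- min_layers = 0 : A's range starts at 0, contributing [[]]
    subst h0
    rw [PySem.List.pyRange_one_cons (by omega : (0:Int) < max_layers + 1)]
    simp only [List.flatMap_cons]
    rw [if_pos ⟨le_refl 0, hmax⟩]
    have h01 : (0 : Int) + 1 = 1 := by norm_num
    rw [h01, hr]
    congr 1
    refine List.flatMap_congr ?_ ; intro n hn
    simp only [List.mem_map, List.mem_range] at hn
    obtain ⟨k, _, rfl⟩ := hn
    rw [if_pos (by positivity)]
  · -- 1 ≤ min_layers : the 0-row is absent and the filter cuts [1, min_layers)
    rw [if_neg (by omega)]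
    simp only [List.nil_append, ← hr]
    rw [PySem.List.pyRange_one_append 1 min_layers (max_layers + 1) (by omega) (by omega),
      List.flatMap_append]
    have hz : (PySem.List.pyRange 1 min_layers 1).flatMap
        (fun n => if min_layers ≤ n then pvProdRep units n.toNat else []) = [] := by
      rw [List.flatMap_eq_nil_iff]
      intro n hn
      rw [PySem.List.mem_pyRange_one] at hn
      rw [if_neg (by omega)]
    rw [hz, List.nil_append]
    refine List.flatMap_congr ?_ ; intro n hn
    rw [PySem.List.mem_pyRange_one] at hn
    rw [if_pos (by omega)]

-- ===== VERDICT (by name: the statement is the Claim_ definition above) =====
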